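-- pv_equiv track=rewrite | github.com/0leslaw/music_genres_analysis | utils.py | insert_means_floored
-- ===== SOURCE A (Python) =====
-- def insert_means_floored(lst):
--     # Create a new list to store the result
--     result = []
--
--     # Iterate over the original list
--     for i in range(len(lst) - 1):
--         # Append the current element
--         result.append(lst[i])
--         # Calculate the mean of the current element and the next element
--         mean_value = (lst[i] + lst[i + 1]) // 2
--         # Append the mean value
--         result.append(mean_value)
--
--     # Append the last element of the original list
--     result.append(lst[-1])
--
--     return result
-- ===== SOURCE B (Python) =====
-- def insert_means_floored(lst):
--     # Closed-form indexing of the output: position j holds lst[j//2] when j is even,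
--     # and the floored mean of lst[j//2], lst[j//2 + 1] when j is odd.
--     n = len(lst)
--     return [lst[j // 2] if j % 2 == 0 else (lst[j // 2] + lst[j // 2 + 1]) // 2
--             for j in range(2 * n - 1)]
-- ===== Notes on version B (the rewrite author's own statement) =====
-- stated objective: alternative
-- what changed: Replaces A's streaming loop (emit element, then mean, pair by pair, then append the last element) with a closed-form description of the output: one comprehension over the 2n-1 output positions that computes each position independently from its index parity (even -> original element, odd -> floored mean of neighbours); no accumulator and no final append.
import Mathlib
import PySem

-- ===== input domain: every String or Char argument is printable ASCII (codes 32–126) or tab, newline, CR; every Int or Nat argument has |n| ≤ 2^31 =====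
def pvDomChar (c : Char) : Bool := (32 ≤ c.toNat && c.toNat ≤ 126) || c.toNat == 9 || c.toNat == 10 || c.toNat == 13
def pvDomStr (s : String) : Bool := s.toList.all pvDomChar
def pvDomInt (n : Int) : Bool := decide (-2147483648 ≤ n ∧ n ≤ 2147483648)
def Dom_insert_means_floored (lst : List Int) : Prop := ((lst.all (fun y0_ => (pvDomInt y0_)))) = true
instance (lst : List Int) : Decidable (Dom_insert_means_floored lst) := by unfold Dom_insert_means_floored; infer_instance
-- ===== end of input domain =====

-- B replaces A's streaming pair loop with a closed-form index formula over the 2n-1 output positions (parity decides element vs mean); same cost, different decomposition.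

-- ===== PORT A =====
-- index loop emitting lst[i] and the floored mean of lst[i], lst[i+1]; then append lst[-1]
-- (indices read with pyGetD: inside Pre_ every index the loop and the final lst[-1] use is in range)
def insert_means_floored (lst : List Int) : List Int :=
  (PySem.List.pyRange 0 ((lst.length : Int) - 1) 1).foldl
    (fun result i =>
      result ++ [PySem.List.pyGetD lst i 0,
        PySem.Int.floordiv (PySem.List.pyGetD lst i 0 + PySem.List.pyGetD lst (i + 1) 0) 2]) []
  ++ [PySem.List.pyGetD lst (-1) 0]

-- ===== PORT B =====
-- one comprehension over range(2n-1): position j holds lst[j//2] if j even, else the floored mean of lst[j//2], lst[j//2+1]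
def insert_means_floored_alt (lst : List Int) : List Int :=
  (PySem.List.pyRange 0 (2 * (lst.length : Int) - 1) 1).map (fun j =>
    if PySem.Int.mod j 2 = 0 then
      PySem.List.pyGetD lst (PySem.Int.floordiv j 2) 0
    else
      PySem.Int.floordiv
        (PySem.List.pyGetD lst (PySem.Int.floordiv j 2) 0
          + PySem.List.pyGetD lst (PySem.Int.floordiv j 2 + 1) 0) 2)

-- ===== PRECONDITION & SPEC =====
-- Pre_ excludes only the empty list, on which Python A raises IndexError at lst[-1] (B returns [] there).
def Pre_insert_means_floored (lst : List Int) : Prop := lst ≠ []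
instance (lst : List Int) : Decidable (Pre_insert_means_floored lst) := by unfold Pre_insert_means_floored; infer_instance
def pvWitness_insert_means_floored : List Int := [3, 8, 5]
def Spec_insert_means_floored (lst : List Int) (out : List Int) : Prop := out = insert_means_floored_alt lst
instance (lst : List Int) (out : List Int) : Decidable (Spec_insert_means_floored lst out) := by unfold Spec_insert_means_floored; infer_instance

-- ===== CLAIM (what is proved, stated in full; the proofs are below) =====
def Claim_equal_insert_means_floored : Prop := ∀ (lst : List Int), Dom_insert_means_floored lst → Pre_insert_means_floored lst → Spec_insert_means_floored lst (insert_means_floored lst)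

-- ===== LEMMAS AND PROOFS =====

-- shape lemma specific to the two programs: a map over the 2k+1 output positions
-- equals k two-element blocks followed by the final position
theorem map_range_odd_eq_blocks (f : Nat → Int) :
    ∀ k : Nat, (List.range (2 * k + 1)).map f
      = ((List.range k).flatMap (fun i => [f (2 * i), f (2 * i + 1)])) ++ [f (2 * k)] := by
  intro k
  induction k with
  | zero => simp
  | succ k ih =>
    have h1 : 2 * (k + 1) + 1 = (2 * k + 1) + 1 + 1 := by ring
    rw [h1, List.range_succ, List.range_succ, List.map_append, List.map_append, ih,
      List.range_succ, List.flatMap_append]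
    simp only [List.flatMap_cons, List.flatMap_nil, List.map_cons, List.map_nil]
    have h2 : 2 * k + 1 + 1 = 2 * (k + 1) := by ring
    rw [h2]
    simp [List.append_assoc]

theorem insert_means_floored_spec : Claim_equal_insert_means_floored := by
  intro lst _ hne
  unfold Spec_insert_means_floored insert_means_floored insert_means_floored_alt
  rw [PySem.List.foldl_append_eq_flatMap, List.nil_append]
  -- rewrite both ranges as Nat ranges
  have hlen1 : ((lst.length : Int)) - 1 = ((lst.length - 1 : Nat) : Int) := by
    have : 1 ≤ lst.length := List.length_pos_of_ne_nil hne
    omega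
  have hlen2 : 2 * ((lst.length : Int)) - 1 = ((2 * (lst.length - 1) + 1 : Nat) : Int) := by
    have : 1 ≤ lst.length := List.length_pos_of_ne_nil hne
    omega
  rw [hlen1, hlen2, PySem.List.pyRange_zero_natCast, PySem.List.pyRange_zero_natCast,
    List.flatMap_map, List.map_map]
  rw [map_range_odd_eq_blocks]
  congr 1
  · -- the k two-element blocks agree
    apply List.flatMap_congr
    intro i _
    simp only [Function.comp]
    have hmod0 : PySem.Int.mod ((2 * i : Nat) : Int) 2 = 0 := by
      rw [show ((2:Int)) = ((2:Nat):Int) from rfl, PySem.Int.mod_natCast]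
      omega
    have hdiv0 : PySem.Int.floordiv ((2 * i : Nat) : Int) 2 = (i : Int) := by
      rw [show ((2:Int)) = ((2:Nat):Int) from rfl, PySem.Int.floordiv_natCast]
      omega
    have hmod1 : PySem.Int.mod ((2 * i + 1 : Nat) : Int) 2 = 1 := by
      rw [show ((2:Int)) = ((2:Nat):Int) from rfl, PySem.Int.mod_natCast]
      omega
    have hdiv1 : PySem.Int.floordiv ((2 * i + 1 : Nat) : Int) 2 = (i : Int) := by
      rw [show ((2:Int)) = ((2:Nat):Int) from rfl, PySem.Int.floordiv_natCast]
      omega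
    rw [hmod0, hdiv0, hmod1, hdiv1]
    rw [show ((i : Int) + 1) = ((i + 1 : Nat) : Int) by push_cast; ring]
    simp [PySem.List.pyGetD_natCast]
  · -- the final position is lst[-1]
    have hk : lst.length - 1 < lst.length := by
      have : 1 ≤ lst.length := List.length_pos_of_ne_nil hne
      omega
    have hmod0 : PySem.Int.mod ((2 * (lst.length - 1) : Nat) : Int) 2 = 0 := by
      rw [show ((2:Int)) = ((2:Nat):Int) from rfl, PySem.Int.mod_natCast]
      omega
    have hdiv0 : PySem.Int.floordiv ((2 * (lst.length - 1) : Nat) : Int) 2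
        = ((lst.length - 1 : Nat) : Int) := by
      rw [show ((2:Int)) = ((2:Nat):Int) from rfl, PySem.Int.floordiv_natCast]
      omega
    simp only [Function.comp, hmod0, hdiv0, PySem.List.pyGetD_natCast]
    have hne' : lst ≠ [] := hne
    rw [PySem.List.pyGetD_neg_one lst 0 hne', List.getLast_eq_getElem, List.getD_eq_getElem]
    · simp
    · exact hk
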